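-- pv_equiv track=rewrite | github.com/akoiralaa/statistical-arbitrage | src/analyzer.py | _calculate_consecutive_wins
-- ===== SOURCE A (Python) =====
-- def _calculate_consecutive_wins(pnl_list):
--     """Calculate maximum consecutive winning trades."""
--     max_consecutive = 0
--     current_consecutive = 0
--
--     for pnl in pnl_list:
--         if pnl > 0:
--             current_consecutive += 1
--             max_consecutive = max(max_consecutive, current_consecutive)
--         else:
--             current_consecutive = 0
--
--     return max_consecutive
-- ===== SOURCE B (Python) =====
-- def _calculate_consecutive_wins(pnl_list):
--     """Scan the list run by run: find each maximal run of positive values and keep the longest."""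
--     n = len(pnl_list)
--     best = 0
--     i = 0
--     while i < n:
--         if pnl_list[i] > 0:
--             j = i + 1
--             while j < n and pnl_list[j] > 0:
--                 j += 1
--             if j - i > best:
--                 best = j - i
--             i = j
--         else:
--             i += 1
--     return best
-- ===== Notes on version B (the rewrite author's own statement) =====
-- stated objective: alternative
-- what changed: Replaced the running current/max counter updated at every element by a run-scanning decomposition: an outer loop jumps from run to run, an inner loop measures each maximal positive run, and the longest run length is kept.
import Mathlib
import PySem

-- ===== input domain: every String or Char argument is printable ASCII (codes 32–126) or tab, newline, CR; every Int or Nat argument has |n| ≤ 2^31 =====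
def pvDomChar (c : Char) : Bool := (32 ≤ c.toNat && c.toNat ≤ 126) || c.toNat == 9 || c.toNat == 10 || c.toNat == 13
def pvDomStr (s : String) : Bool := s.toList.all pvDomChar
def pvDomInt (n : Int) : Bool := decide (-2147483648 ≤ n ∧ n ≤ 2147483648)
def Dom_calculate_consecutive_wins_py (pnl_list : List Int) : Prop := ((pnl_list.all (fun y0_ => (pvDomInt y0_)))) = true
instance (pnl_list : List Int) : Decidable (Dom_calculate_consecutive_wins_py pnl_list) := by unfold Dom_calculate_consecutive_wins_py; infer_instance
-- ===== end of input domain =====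

-- B replaces A's per-element current/max counter by a run-scanning decomposition (find each maximal positive run, keep the longest); alternative structure, same cost.


-- ===== PORT A =====
-- A: fold over the list carrying (max_consecutive, current_consecutive)
def calculate_consecutive_wins_py (pnl_list : List Int) : Int :=
  (pnl_list.foldl
    (fun (s : Int × Int) pnl =>
      if pnl > 0 then (max s.1 (s.2 + 1), s.2 + 1) else (s.1, 0))
    (0, 0)).1

-- ===== PORT B =====
-- B helper: length of the leading run of positive values, and the remainder after it
def pvTakeRun : List Int → Int × List Int
  | [] => (0, [])
  | x :: rest =>
    if x > 0 then
      let p := pvTakeRun rest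
      (p.1 + 1, p.2)
    else (0, x :: rest)

theorem pvTakeRun_len : ∀ (l : List Int), (pvTakeRun l).2.length ≤ l.length := by
  intro l
  induction l with
  | nil => simp [pvTakeRun]
  | cons x rest ih =>
    simp only [pvTakeRun]
    split
    · simpa using Nat.le_succ_of_le ih
    · simp

-- B outer loop: jump from run to run, keeping the best run length
def pvGo : List Int → Int → Int
  | [], best => best
  | x :: rest, best =>
    if x > 0 then
      pvGo (pvTakeRun rest).2 (max best ((pvTakeRun rest).1 + 1))
    else
      pvGo rest best
termination_by l _ => l.length
decreasing_by
  · exact Nat.lt_succ_of_le (pvTakeRun_len rest)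
  · simp

def calculate_consecutive_wins_py_alt (pnl_list : List Int) : Int :=
  pvGo pnl_list 0

-- ===== PRECONDITION & SPEC =====
def Spec_calculate_consecutive_wins_py (pnl_list : List Int) (out : Int) : Prop := out = calculate_consecutive_wins_py_alt pnl_list
instance (pnl_list : List Int) (out : Int) : Decidable (Spec_calculate_consecutive_wins_py pnl_list out) := by unfold Spec_calculate_consecutive_wins_py; infer_instance

-- ===== CLAIM (what is proved, stated in full; the proofs are below) =====
def Claim_equal_calculate_consecutive_wins_py : Prop := ∀ (pnl_list : List Int), Dom_calculate_consecutive_wins_py pnl_list → Spec_calculate_consecutive_wins_py pnl_list (calculate_consecutive_wins_py pnl_list)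

-- ===== LEMMAS AND PROOFS =====

theorem pvTakeRun_nonneg : ∀ (l : List Int), 0 ≤ (pvTakeRun l).1 := by
  intro l
  induction l with
  | nil => simp [pvTakeRun]
  | cons x rest ih =>
    simp only [pvTakeRun]
    split
    · omega
    · simp

-- pvGo absorbs the leading run into its accumulator
theorem pvGo_takeRun (l : List Int) (m : Int) (hm : 0 ≤ m) :
    pvGo l m = pvGo (pvTakeRun l).2 (max m (pvTakeRun l).1) := by
  cases l with
  | nil => simp [pvTakeRun, pvGo, max_eq_left hm]
  | cons x rest =>
    by_cases hx : x > 0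
    · simp [pvTakeRun, pvGo, hx]
    · simp [pvTakeRun, pvGo, hx, max_eq_left hm]

-- main invariant: A's fold from (m, c) equals B's run scan with the open run of length c absorbed
theorem foldA_eq : ∀ (l : List Int) (m c : Int), 0 ≤ c → c ≤ m →
    (l.foldl
      (fun (s : Int × Int) pnl =>
        if pnl > 0 then (max s.1 (s.2 + 1), s.2 + 1) else (s.1, 0))
      (m, c)).1
    = pvGo (pvTakeRun l).2 (max m (c + (pvTakeRun l).1)) := by
  intro l
  induction l with
  | nil =>
    intro m c hc hcm
    simp [pvTakeRun, pvGo]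
    omega
  | cons x rest ih =>
    intro m c hc hcm
    by_cases hx : x > 0
    · simp only [List.foldl_cons, if_pos hx]
      rw [ih (max m (c + 1)) (c + 1) (by omega) (by omega)]
      have hn := pvTakeRun_nonneg rest
      have : max (max m (c + 1)) (c + 1 + (pvTakeRun rest).1)
           = max m (c + ((pvTakeRun rest).1 + 1)) := by omega
      simp [pvTakeRun, hx, this]
    · simp only [List.foldl_cons, if_neg hx]
      rw [ih m 0 (by omega) (by omega)]
      have h1 : max m (0 + (pvTakeRun rest).1) = max m (pvTakeRun rest).1 := by omega
      have h2 : max m (c + (pvTakeRun (x :: rest)).1) = m := by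
        simp [pvTakeRun, hx]; omega
      rw [h1, h2, ← pvGo_takeRun rest m (by omega)]
      simp [pvTakeRun, pvGo, hx]

-- ===== VERDICT (by name: the statement is the Claim_ definition above) =====
theorem calculate_consecutive_wins_py_spec : Claim_equal_calculate_consecutive_wins_py := by
  intro l _
  unfold Spec_calculate_consecutive_wins_py calculate_consecutive_wins_py calculate_consecutive_wins_py_alt
  rw [foldA_eq l 0 0 le_rfl le_rfl, Int.zero_add, ← pvGo_takeRun l 0 le_rfl]
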